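-- pv_equiv track=rewrite | github.com/feirik/Writeups | guessing_game_4/solve.py | make_list_seventh
-- ===== SOURCE A (Python) =====
-- def make_list_seventh(false_count_list):
--     zero_false_list = []
--     one_false_list = []
--     two_false_list = []
--     three_false_list = []
--
--     iter = 0
--     for i in false_count_list:
--         if i == 0:
--             zero_false_list.append(iter)
--         if i == 1:
--             one_false_list.append(iter)
--         if i == 2:
--             two_false_list.append(iter)
--         if i == 3:
--             three_false_list.append(iter)
--         iter += 1
--
--     remove_zero = zero_false_list[0:32]
--     remove_one = one_false_list[:192]
--     remove_two = two_false_list[:480]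
--     remove_three = three_false_list[:640]
--
--     test_list = remove_zero + remove_one + remove_two + remove_three
--
--     return test_list
-- ===== SOURCE B (Python) =====
-- def make_list_seventh(false_count_list):
--     result = []
--     for v, cap in enumerate([32, 192, 480, 640]):
--         result += [i for i, x in enumerate(false_count_list) if x == v][:cap]
--     return result
-- ===== Notes on version B (the rewrite author's own statement) =====
-- stated objective: idiomatic
-- what changed: Replaced the single pass that appends into four named accumulator lists with four independent enumerate-filter comprehensions, one per value 0-3, each sliced to its cap and concatenated in order.
import Mathlib
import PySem

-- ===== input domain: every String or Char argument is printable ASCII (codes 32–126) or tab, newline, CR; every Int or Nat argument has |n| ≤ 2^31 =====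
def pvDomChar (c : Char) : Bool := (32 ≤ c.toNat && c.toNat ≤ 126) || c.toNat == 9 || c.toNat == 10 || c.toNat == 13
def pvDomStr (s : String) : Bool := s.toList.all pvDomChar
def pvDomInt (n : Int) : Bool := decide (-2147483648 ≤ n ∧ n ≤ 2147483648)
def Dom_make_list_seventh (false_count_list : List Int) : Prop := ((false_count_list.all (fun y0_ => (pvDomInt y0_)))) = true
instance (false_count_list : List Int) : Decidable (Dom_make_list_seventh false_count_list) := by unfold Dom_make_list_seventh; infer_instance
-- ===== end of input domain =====

-- B replaces A's single pass into four accumulator lists by one enumerate-filter pass per value; return value only, no mutation.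

-- ===== PORT A =====
-- single pass appending the running index into one of four buckets, then slice and concatenate
def make_list_seventh (false_count_list : List Int) : List Int :=
  let s := false_count_list.foldl
    (fun (st : List Int × List Int × List Int × List Int × Int) (i : Int) =>
      match st with
      | (z, o, t, h, it) =>
        ((if i == 0 then z ++ [it] else z),
         (if i == 1 then o ++ [it] else o),
         (if i == 2 then t ++ [it] else t),
         (if i == 3 then h ++ [it] else h),
         it + 1))
    ([], [], [], [], 0)
  PySem.List.slice s.1 (some 0) (some 32) ++
  PySem.List.slice s.2.1 none (some 192) ++
  PySem.List.slice s.2.2.1 none (some 480) ++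
  PySem.List.slice s.2.2.2.1 none (some 640)

-- ===== PORT B =====
-- [i for i, x in enumerate(false_count_list) if x == v]
def pvBucket (false_count_list : List Int) (v : Int) : List Int :=
  ((PySem.List.enumerate false_count_list 0).filter (fun p => p.2 == v)).map (fun p => p.1)

def make_list_seventh_alt (false_count_list : List Int) : List Int :=
  (PySem.List.enumerate ([32, 192, 480, 640] : List Int) 0).foldl
    (fun acc p => acc ++ PySem.List.slice (pvBucket false_count_list p.1) none (some p.2)) []

-- ===== PRECONDITION & SPEC =====
def Spec_make_list_seventh (false_count_list : List Int) (out : List Int) : Prop := out = make_list_seventh_alt false_count_list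
instance (false_count_list : List Int) (out : List Int) : Decidable (Spec_make_list_seventh false_count_list out) := by unfold Spec_make_list_seventh; infer_instance

-- ===== CLAIM (what is proved, stated in full; the proofs are below) =====
def Claim_equal_make_list_seventh : Prop := ∀ (false_count_list : List Int), Dom_make_list_seventh false_count_list → Spec_make_list_seventh false_count_list (make_list_seventh false_count_list)

-- ===== LEMMAS AND PROOFS =====

-- indices-of-occurrences list with enumeration starting at s
def pvIdx (l : List Int) (v : Int) (s : Int) : List Int :=
  ((PySem.List.enumerate l s).filter (fun p => p.2 == v)).map (fun p => p.1)

theorem pvIdx_nil (v s : Int) : pvIdx [] v s = [] := rfl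

theorem pvIdx_cons (x : Int) (l : List Int) (v s : Int) :
    pvIdx (x :: l) v s = (if x == v then [s] else []) ++ pvIdx l v (s + 1) := by
  simp only [pvIdx, PySem.List.enumerate_cons, List.filter_cons]
  by_cases h : x == v <;> simp [h]

-- the loop invariant for A's fold
theorem foldA_inv (l : List Int) (z o t h : List Int) (it : Int) :
    l.foldl
      (fun (st : List Int × List Int × List Int × List Int × Int) (i : Int) =>
        match st with
        | (z, o, t, h, it) =>
          ((if i == 0 then z ++ [it] else z),
           (if i == 1 then o ++ [it] else o),
           (if i == 2 then t ++ [it] else t),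
           (if i == 3 then h ++ [it] else h),
           it + 1))
      (z, o, t, h, it)
    = (z ++ pvIdx l 0 it, o ++ pvIdx l 1 it, t ++ pvIdx l 2 it, h ++ pvIdx l 3 it,
       it + l.length) := by
  induction l generalizing z o t h it with
  | nil => simp [pvIdx_nil]
  | cons x xs ih =>
    simp only [List.foldl_cons, ih, pvIdx_cons, List.length_cons, Prod.mk.injEq]
    refine ⟨?_, ?_, ?_, ?_, by push_cast; ring⟩ <;>
      · by_cases hx : x == 0 <;> by_cases h1 : x == 1 <;> by_cases h2 : x == 2 <;>
          by_cases h3 : x == 3 <;> simp_all [List.append_assoc]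

-- ===== VERDICT (by name: the statement is the Claim_ definition above) =====
theorem make_list_seventh_spec : Claim_equal_make_list_seventh := by
  intro l _
  show make_list_seventh l = make_list_seventh_alt l
  simp only [make_list_seventh, make_list_seventh_alt, foldA_inv]
  simp [PySem.List.enumerate_cons, PySem.List.enumerate_nil, pvBucket, pvIdx,
    List.foldl_cons, List.foldl_nil, List.append_assoc]
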